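-- pv_equiv track=rewrite | github.com/itscheel/G.E.T | text_detection.py | is_box_inside_box
-- ===== SOURCE A (Python) =====
-- def is_point_inside_box(point, box):
--     if box[2] <= point[0] and point[0] <= box[2] + box[0]:
--         if box[3] <= point[1] and point[1] <= box[3] + box[1]:
--             return True
--     return False
--
-- def is_box_inside_box(small_box, big_box):
--     points = [
--         (small_box[2], small_box[3]),
--         (small_box[2] + small_box[0], small_box[3]),
--         (small_box[2]               , small_box[3] + small_box[1]),
--         (small_box[2] + small_box[0], small_box[3] + small_box[1])
--     ]
--     for point in points:
--         if not is_point_inside_box(point, big_box):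
--             return False
--     return True
-- ===== SOURCE B (Python) =====
-- def is_box_inside_box(small_box, big_box):
--     bx, by = big_box[2], big_box[3]
--     return (bx <= small_box[2] <= bx + big_box[0]
--             and bx <= small_box[2] + small_box[0] <= bx + big_box[0]
--             and by <= small_box[3] <= by + big_box[1]
--             and by <= small_box[3] + small_box[1] <= by + big_box[1])
-- ===== Notes on version B (the rewrite author's own statement) =====
-- stated objective: simpler
-- what changed: Removed the corner-point list, the loop and the is_point_inside_box helper; containment is one flat conjunction of interval bounds on the x and y endpoints.
import Mathlib
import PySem

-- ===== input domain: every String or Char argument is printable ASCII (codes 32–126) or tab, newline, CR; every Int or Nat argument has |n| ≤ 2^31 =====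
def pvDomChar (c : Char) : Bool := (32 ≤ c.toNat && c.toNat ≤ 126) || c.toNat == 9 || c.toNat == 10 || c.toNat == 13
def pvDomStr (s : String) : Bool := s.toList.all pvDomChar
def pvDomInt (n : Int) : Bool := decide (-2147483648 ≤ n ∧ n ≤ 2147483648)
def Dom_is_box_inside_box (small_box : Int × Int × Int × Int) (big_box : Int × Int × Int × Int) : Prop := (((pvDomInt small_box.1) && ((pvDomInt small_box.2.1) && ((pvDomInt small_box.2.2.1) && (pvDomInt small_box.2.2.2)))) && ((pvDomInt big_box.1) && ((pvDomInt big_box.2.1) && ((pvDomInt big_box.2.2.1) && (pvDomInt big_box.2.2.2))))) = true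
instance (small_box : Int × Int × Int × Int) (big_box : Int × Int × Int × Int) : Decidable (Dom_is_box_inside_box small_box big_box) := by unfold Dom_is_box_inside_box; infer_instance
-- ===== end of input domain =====

-- B replaces the corner-list loop and the point-in-box helper by one flat conjunction of endpoint bounds (simpler).


-- ===== PORT A =====
def is_point_inside_box (point : Int × Int) (box : Int × Int × Int × Int) : Bool :=
  if box.2.2.1 ≤ point.1 ∧ point.1 ≤ box.2.2.1 + box.1 then
    if box.2.2.2 ≤ point.2 ∧ point.2 ≤ box.2.2.2 + box.2.1 then
      true
    else false
  else false

def is_box_inside_box (small_box : Int × Int × Int × Int) (big_box : Int × Int × Int × Int) : Bool :=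
  let points : List (Int × Int) :=
    [ (small_box.2.2.1, small_box.2.2.2),
      (small_box.2.2.1 + small_box.1, small_box.2.2.2),
      (small_box.2.2.1, small_box.2.2.2 + small_box.2.1),
      (small_box.2.2.1 + small_box.1, small_box.2.2.2 + small_box.2.1) ]
  -- for point in points: if not inside: return False; return True
  points.all (fun point => is_point_inside_box point big_box)

-- ===== PORT B =====
def is_box_inside_box_alt (small_box : Int × Int × Int × Int) (big_box : Int × Int × Int × Int) : Bool :=
  let bx := big_box.2.2.1
  let by_ := big_box.2.2.2
  decide (bx ≤ small_box.2.2.1 ∧ small_box.2.2.1 ≤ bx + big_box.1) &&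
  decide (bx ≤ small_box.2.2.1 + small_box.1 ∧ small_box.2.2.1 + small_box.1 ≤ bx + big_box.1) &&
  decide (by_ ≤ small_box.2.2.2 ∧ small_box.2.2.2 ≤ by_ + big_box.2.1) &&
  decide (by_ ≤ small_box.2.2.2 + small_box.2.1 ∧ small_box.2.2.2 + small_box.2.1 ≤ by_ + big_box.2.1)

-- ===== PRECONDITION & SPEC =====
def Spec_is_box_inside_box (small_box : Int × Int × Int × Int) (big_box : Int × Int × Int × Int) (out : Bool) : Prop := out = is_box_inside_box_alt small_box big_box
instance (small_box : Int × Int × Int × Int) (big_box : Int × Int × Int × Int) (out : Bool) : Decidable (Spec_is_box_inside_box small_box big_box out) := by unfold Spec_is_box_inside_box; infer_instance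

-- ===== CLAIM (what is proved, stated in full; the proofs are below) =====
def Claim_equal_is_box_inside_box : Prop := ∀ (small_box : Int × Int × Int × Int) (big_box : Int × Int × Int × Int), Dom_is_box_inside_box small_box big_box → Spec_is_box_inside_box small_box big_box (is_box_inside_box small_box big_box)

-- ===== LEMMAS AND PROOFS =====

-- ===== VERDICT (by name: the statement is the Claim_ definition above) =====
theorem point_check (p : Int × Int) (box : Int × Int × Int × Int) :
    is_point_inside_box p box =
      (decide (box.2.2.1 ≤ p.1 ∧ p.1 ≤ box.2.2.1 + box.1) &&
       decide (box.2.2.2 ≤ p.2 ∧ p.2 ≤ box.2.2.2 + box.2.1)) := by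
  unfold is_point_inside_box
  split_ifs <;> simp_all

theorem is_box_inside_box_spec : Claim_equal_is_box_inside_box := by
  intro s b _
  unfold Spec_is_box_inside_box is_box_inside_box is_box_inside_box_alt
  rw [Bool.eq_iff_iff]
  simp only [List.all_cons, List.all_nil, point_check, Bool.and_eq_true, Bool.and_true,
    decide_eq_true_eq]
  tauto
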